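-- pv_equiv track=rewrite | github.com/AP-MI-2021/lab-4-PhantomR | main.py | replace_positive_numbers_by_their_gcd
-- ===== SOURCE A (Python) =====
-- def gcd2(x: int, y: int) -> int:
--     """
--     Finds the greatest common divisor of two numbers.
--
--     Parameters
--     ----------
--     x, y: int
--         The two numbers whose GCD we are trying to find.
--
--     Returns
--     -------
--     int:
--         The GCD of x and y.
--     """
--     # we use Euclid's subtraction-based algorithm
--     # if the two numbers are the same, their GCD is their common value
--     if x == y:
--         return x
--
--     # if the two numbers are distinct, we call recursively, changing only the
--     # largest's value by subtracting the lower one from it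
--     if x > y:
--         return gcd2(x - y, y)
--     else:
--         return gcd2(x, y - x)
--
-- def gcd_list(lst: list[int]) -> int:
--     """
--     Finds the GCD of all the numbers in a given list of integers.
--
--     Parameters
--     ----------
--     lst : list[int]
--         The list containing the numbers whose GCD we are trying to find.
--
--     Returns
--     -------
--     int:
--         The GCD of all the numbers in the given list.
--
--     """
--
--     if len(lst) == 1:
--         return lst[0]
--
--     # we use the fact that gcd(a0,a2,...,an) = gcd(gcd(a0,..,a(n-1)), an)
--     return gcd2(lst[-1], gcd_list(lst[:-1]))
--
-- def replace_positive_numbers_by_their_gcd(lst: list[int]) -> list[int]: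
--     """
--     Returns a list where  all positive numbers in the given list have been replaced by their GCD.
--
--     Parameters
--     ----------
--     lst : list[int]
--         The list we are processing.
--
--     Returns
--     -------
--     list[int]:
--         A copy of the given list where all positive numbers have beeen replaced by their GCD.
--
--     """
--
--     positive_numbers = find_positive_integers(lst)
--     gcd_of_positive_numbers = gcd_list(positive_numbers)
--     result = []
--     for element in lst:
--         if element > 0:
--             result.append(gcd_of_positive_numbers)
--         else:
--             result.append(element)
--
--     return result
--
-- def find_positive_integers(lst: list[int]) -> list[int]:
--     """
--     Finds positive numbers in the given list and returns them in a new list.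
--
--     Parameters
--     ----------
--     lst : list[int]
--         The list in which we are looking for positive numbers.
--
--     Returns
--     -------
--     list[int]
--         The positive numbers found in the given list.
--
--     """
--     positive_numbers = []
--     for element in lst:
--         if element > 0:
--             positive_numbers.append(element)
--
--     return positive_numbers
-- ===== SOURCE B (Python) =====
-- def replace_positive_numbers_by_their_gcd(lst: list[int]) -> list[int]:
--     positives = [x for x in lst if x > 0]
--     g = positives[0]  # raises IndexError when there are no positives, like A
--     for x in positives[1:]:
--         a, b = g, x
--         while b:
--             a, b = b, a % b
--         g = a
--     return [g if x > 0 else x for x in lst]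
-- ===== Notes on version B (the rewrite author's own statement) =====
-- stated objective: faster
-- what changed: Replaces A's two recursions (subtraction-based gcd2 and gcd_list peeling the last element) by a single left fold over the positives using an iterative modulo Euclid loop, and a comprehension for the final replacement pass.
import Mathlib
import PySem

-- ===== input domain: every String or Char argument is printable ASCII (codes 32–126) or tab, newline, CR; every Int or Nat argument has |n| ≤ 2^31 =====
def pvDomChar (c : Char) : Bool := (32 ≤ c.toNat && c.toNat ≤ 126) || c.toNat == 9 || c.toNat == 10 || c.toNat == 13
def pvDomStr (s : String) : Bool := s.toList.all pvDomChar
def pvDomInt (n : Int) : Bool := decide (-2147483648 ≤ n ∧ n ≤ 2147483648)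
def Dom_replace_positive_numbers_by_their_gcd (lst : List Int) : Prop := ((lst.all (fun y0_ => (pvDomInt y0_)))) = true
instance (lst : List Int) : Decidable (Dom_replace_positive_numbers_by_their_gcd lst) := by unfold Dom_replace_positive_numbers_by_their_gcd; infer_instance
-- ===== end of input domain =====

-- B replaces A's two recursions (subtraction gcd2 + gcd_list peeling the last element)
-- by one left fold over the positives with an iterative modulo-Euclid loop and a map pass.


-- ===== PORT A =====
-- gcd2: Euclid's subtraction algorithm, literal recursion. On inputs where x ≠ y and
-- one of them is ≤ 0 Python recurses forever; the guard returning x there only makes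
-- the function total (those calls are unreachable under Pre_, where all inputs are positive).
def gcd2 (x y : Int) : Int :=
  if x = y then x
  else if x ≤ 0 ∨ y ≤ 0 then x   -- totality guard; Python diverges here, unreachable under Pre_
  else if x > y then gcd2 (x - y) y else gcd2 x (y - x)
termination_by (x + y).toNat
decreasing_by all_goals omega

-- gcd_list: len 1 → lst[0]; else gcd2(lst[-1], gcd_list(lst[:-1])).
-- On [] Python raises IndexError at lst[-1]; excluded by Pre_ (returns 0 here for totality).
def gcd_list : List Int → Int
  | [] => 0
  | [x] => x
  | x :: y :: rest =>
      gcd2 ((PySem.List.pyGet? (x :: y :: rest) (-1)).getD 0)   -- lst[-1]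
           (gcd_list (x :: y :: rest).dropLast)                 -- lst[:-1]
termination_by l => l.length
decreasing_by simp [List.length_dropLast]

def find_positive_integers (lst : List Int) : List Int :=
  lst.foldl (fun acc e => if e > 0 then acc ++ [e] else acc) []

def replace_positive_numbers_by_their_gcd (lst : List Int) : List Int :=
  let positive_numbers := find_positive_integers lst
  let gcd_of_positive_numbers := gcd_list positive_numbers
  lst.foldl (fun acc e => if e > 0 then acc ++ [gcd_of_positive_numbers] else acc ++ [e]) []

-- ===== PORT B =====
-- iterative Euclid:  while b: a, b = b, a % b  (Python %, PySem.Int.mod)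
def euclid (a b : Int) : Int :=
  if hb : b = 0 then a else euclid b (PySem.Int.mod a b)
termination_by b.natAbs
decreasing_by
  rcases lt_trichotomy b 0 with h | h | h
  · have := PySem.Int.mod_neg_bounds (a := a) h; omega
  · exact absurd h hb
  · have h1 := PySem.Int.mod_nonneg (a := a) h
    have h2 := PySem.Int.mod_lt (a := a) h
    omega

-- positives[0] raises IndexError in Python when there are no positives (like A); the
-- [] branch returning [] only makes the port total and is unreachable under Pre_.
def replace_positive_numbers_by_their_gcd_alt (lst : List Int) : List Int :=
  let positives := lst.filter (fun x => x > 0)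
  match positives with
  | [] => []
  | p :: rest =>
      let g := rest.foldl euclid p
      lst.map (fun x => if x > 0 then g else x)

-- ===== PRECONDITION & SPEC =====
-- Pre_ excludes lists with no positive element: there A raises IndexError in gcd_list
-- (lst[-1] on the empty list) and B raises IndexError at positives[0].
def Pre_replace_positive_numbers_by_their_gcd (lst : List Int) : Prop :=
  ∃ x ∈ lst, 0 < x
instance (lst : List Int) : Decidable (Pre_replace_positive_numbers_by_their_gcd lst) := by unfold Pre_replace_positive_numbers_by_their_gcd; infer_instance

def pvWitness_replace_positive_numbers_by_their_gcd : List Int := [6, -2, 0, 9, 15]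

def Spec_replace_positive_numbers_by_their_gcd (lst : List Int) (out : List Int) : Prop := out = replace_positive_numbers_by_their_gcd_alt lst
instance (lst : List Int) (out : List Int) : Decidable (Spec_replace_positive_numbers_by_their_gcd lst out) := by unfold Spec_replace_positive_numbers_by_their_gcd; infer_instance

-- ===== CLAIM (what is proved, stated in full; the proofs are below) =====
def Claim_equal_replace_positive_numbers_by_their_gcd : Prop := ∀ (lst : List Int), Dom_replace_positive_numbers_by_their_gcd lst → Pre_replace_positive_numbers_by_their_gcd lst → Spec_replace_positive_numbers_by_their_gcd lst (replace_positive_numbers_by_their_gcd lst)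

-- ===== LEMMAS AND PROOFS =====

-- F a xs : the common reference value, a left fold of Int.gcd
def foldGcd (a : Int) (xs : List Int) : Int := xs.foldl (fun a x => (Int.gcd a x : Int)) a

theorem foldGcd_pos (xs : List Int) (a : Int) (ha : 0 < a) : 0 < foldGcd a xs := by
  induction xs generalizing a with
  | nil => simpa [foldGcd] using ha
  | cons x t ih =>
      simp only [foldGcd, List.foldl_cons] at *
      exact ih _ (by positivity)

theorem foldGcd_append (a : Int) (xs : List Int) (y : Int) :
    foldGcd a (xs ++ [y]) = Int.gcd (foldGcd a xs) y := by
  simp [foldGcd, List.foldl_append]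

theorem gcd2_eq_gcd : ∀ x y : Int, 0 < x → 0 < y → gcd2 x y = Int.gcd x y := by
  intro x y
  induction x, y using gcd2.induct with
  | case1 y =>
      intro hy _; rw [gcd2]; simp [Int.gcd_self]; exact (abs_of_pos hy).symm
  | case2 x y h1 h2 => intro hx hy; omega
  | case3 x y h1 h2 h3 ih =>
      intro hx hy
      rw [gcd2]; simp only [h1, if_false, h2, if_false, h3, if_true]
      rw [ih (by omega) hy, Int.gcd_sub_self_left]
  | case4 x y h1 h2 h3 ih =>
      intro hx hy
      rw [gcd2]; simp only [h1, if_false, h2, if_false, h3, if_false]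
      rw [ih hx (by omega), Int.gcd_sub_self_right]

theorem euclid_eq_gcd : ∀ a b : Int, 0 < a → 0 ≤ b → euclid a b = Int.gcd a b := by
  intro a b
  induction a, b using euclid.induct with
  | case1 a => intro ha _; rw [euclid]; simp; exact (abs_of_pos ha).symm
  | case2 a b hb ih =>
      intro ha hb0
      have hbpos : 0 < b := lt_of_le_of_ne hb0 (Ne.symm hb)
      rw [euclid]; simp only [hb, dite_false]
      rw [ih hbpos (PySem.Int.mod_nonneg a hbpos),
          PySem.Int.mod_eq_emod_of_pos hbpos]
      rw [Int.gcd_comm, Int.emod_def]; simp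

-- A's gcd_list on a nonempty list of positives equals the left gcd fold
theorem gcd_list_eq : ∀ ps : List Int, (∀ p ∈ ps, 0 < p) →
    ∀ x t, ps = x :: t → gcd_list ps = foldGcd x t := by
  intro ps
  induction ps using gcd_list.induct with
  | case1 => intro _ x t h; exact absurd h (by simp)
  | case2 v => intro _ x t h; cases h; rw [gcd_list]; rfl
  | case3 x y rest ih =>
      intro hpos x' t' h
      cases h
      rw [gcd_list]
      have hlast : (PySem.List.pyGet? (x :: y :: rest) (-1)).getD 0
          = (y :: rest).getLast (by simp) := by
        simp [PySem.List.pyGet?, PySem.List.pyIdx?, List.getLast_eq_getElem]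
      have hpos' : ∀ p ∈ (x :: y :: rest).dropLast, 0 < p :=
        fun p hp => hpos p (List.mem_of_mem_dropLast hp)
      have hdl : (x :: y :: rest).dropLast = x :: (y :: rest).dropLast := by simp
      have ihh := ih hpos' x ((y :: rest).dropLast) hdl
      rw [hlast, ihh]
      have hgl : 0 < (y :: rest).getLast (by simp) :=
        hpos _ (List.mem_cons_of_mem _ (List.getLast_mem (by simp)))
      have hfg : 0 < foldGcd x ((y :: rest).dropLast) :=
        foldGcd_pos _ x (hpos x (by simp))
      rw [gcd2_eq_gcd _ _ hgl hfg, Int.gcd_comm, ← foldGcd_append,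
          List.dropLast_concat_getLast]

theorem foldl_euclid_eq : ∀ (t : List Int) (a : Int), 0 < a → (∀ p ∈ t, 0 < p) →
    t.foldl euclid a = foldGcd a t := by
  intro t
  induction t with
  | nil => intro a _ _; rfl
  | cons x s ih =>
      intro a ha hpos
      have hx : 0 < x := hpos x (by simp)
      simp only [List.foldl_cons, foldGcd] at *
      rw [euclid_eq_gcd a x ha (le_of_lt hx)]
      exact ih _ (by positivity) (fun p hp => hpos p (by simp [hp]))

theorem find_positive_eq (lst : List Int) :
    find_positive_integers lst = lst.filter (fun x => x > 0) := by
  unfold find_positive_integers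
  have := PySem.List.foldl_append_if (p := fun e : Int => decide (e > 0)) (f := id)
    (acc := ([] : List Int)) (l := lst)
  simpa using this

-- ===== VERDICT (by name: the statement is the Claim_ definition above) =====
theorem replace_positive_numbers_by_their_gcd_spec : Claim_equal_replace_positive_numbers_by_their_gcd := by
  intro lst _dom hpre
  unfold Spec_replace_positive_numbers_by_their_gcd
  unfold replace_positive_numbers_by_their_gcd replace_positive_numbers_by_their_gcd_alt
  rw [find_positive_eq]
  obtain ⟨w, hw, hwpos⟩ := hpre
  have hmem : w ∈ lst.filter (fun x => x > 0) := by
    simp [List.mem_filter, hw, hwpos]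
  have hpos : ∀ p ∈ lst.filter (fun x => x > 0), 0 < p := by
    intro p hp; simpa using (List.of_mem_filter hp)
  cases hfil : lst.filter (fun x => x > 0) with
  | nil => rw [hfil] at hmem; simp at hmem
  | cons p rest =>
      rw [hfil] at hpos
      have hp0 : 0 < p := hpos p (by simp)
      have hrest : ∀ q ∈ rest, 0 < q := fun q hq => hpos q (by simp [hq])
      have hA : gcd_list (p :: rest) = foldGcd p rest :=
        gcd_list_eq _ hpos p rest rfl
      have hB : rest.foldl euclid p = foldGcd p rest :=
        foldl_euclid_eq rest p hp0 hrest
      simp only [hA, hB]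
      set g := foldGcd p rest
      have h : (fun (acc : List Int) e => if e > 0 then acc ++ [g] else acc ++ [e])
          = (fun acc e => acc ++ [if e > 0 then g else e]) := by
        funext acc e; split <;> rfl
      rw [h, PySem.List.foldl_append_singleton_eq_map]
      simp
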